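-- pv_equiv track=rewrite | github.com/AnnaVorobyova1401/2019-2-level-labs | lab_4/main.py | clean_tokenize_corpus
-- ===== SOURCE A (Python) =====
-- def clean_tokenize_corpus(texts: list) -> list:
--     tokenized_corpus = []
--     if not isinstance(texts, list):
--         return tokenized_corpus
--     for text_sample in texts:
--         if not isinstance(text_sample, str):
--             continue
--         temp_text = text_sample
--         while '<br />' in temp_text:
--             temp_text = temp_text.replace('<br />', ' ')
--         temp_list = temp_text.split()
--         for word_id, word in enumerate(temp_list):
--             if not word.isalpha():
--                 temp_list[word_id] = ''.join([letter for letter in word if letter.isalpha()])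
--             if not temp_list[word_id].islower():
--                 temp_list[word_id] = temp_list[word_id].lower()
--         while '' in temp_list:
--             temp_list.remove('')
--         tokenized_corpus.append(temp_list)
--     return tokenized_corpus
-- ===== SOURCE B (Python) =====
-- def clean_tokenize_corpus(texts: list) -> list:
--     tokenized_corpus = []
--     if not isinstance(texts, list):
--         return tokenized_corpus
--     for text_sample in texts:
--         if not isinstance(text_sample, str):
--             continue
--         temp_text = text_sample
--         while '<br />' in temp_text:
--             temp_text = temp_text.replace('<br />', ' ')
--         tokens = []
--         current = []
--         for ch in temp_text:
--             if ch.isalpha():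
--                 current.append(ch.lower())
--             elif ch.isspace():
--                 if current:
--                     tokens.append(''.join(current))
--                 current = []
--         if current:
--             tokens.append(''.join(current))
--         tokenized_corpus.append(tokens)
--     return tokenized_corpus
-- ===== Notes on version B (the rewrite author's own statement) =====
-- stated objective: alternative
-- what changed: Replaces A's split()-into-words, per-word isalpha-filter/lower cleanup, and remove('') loop by a single character-by-character scan that keeps a current-word buffer, lowercasing alpha characters as they arrive and flushing the buffer on whitespace (the <br /> replacement while-loop is kept verbatim).
import Mathlib
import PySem

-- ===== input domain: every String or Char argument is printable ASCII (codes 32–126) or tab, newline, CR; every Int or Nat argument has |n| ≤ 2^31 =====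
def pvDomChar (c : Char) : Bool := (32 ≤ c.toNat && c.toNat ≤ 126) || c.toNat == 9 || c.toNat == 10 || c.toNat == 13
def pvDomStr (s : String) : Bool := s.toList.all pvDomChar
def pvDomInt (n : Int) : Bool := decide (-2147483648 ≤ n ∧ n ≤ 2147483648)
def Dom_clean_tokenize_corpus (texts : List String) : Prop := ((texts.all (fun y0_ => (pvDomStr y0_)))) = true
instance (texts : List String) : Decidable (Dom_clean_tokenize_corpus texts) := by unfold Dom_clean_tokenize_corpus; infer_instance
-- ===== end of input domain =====

-- B replaces A's split()-then-per-word-cleanup-then-remove('') pipeline by a single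
-- character scan with a word buffer (same tokens; objective: alternative decomposition).


-- ===== PORT A =====
-- `while '<br />' in temp_text: temp_text = temp_text.replace('<br />', ' ')` — this loop
-- appears VERBATIM in both A and B, so both ports share it.  Each iteration shrinks the
-- string (6 chars become 1), so fuel = length is a totality guard the loop never exhausts.
def pvBrReplLoop : Nat → String → String
  | 0, t => t
  | fuel + 1, t =>
    if PySem.Str.isIn "<br />" t then pvBrReplLoop fuel (PySem.Str.replace t "<br />" " ") else t

def pvBrRepl (t : String) : String := pvBrReplLoop t.toList.length t

-- str.islower(): at least one lowercase cased character and no uppercase one (exact on the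
-- ASCII domain, where the cased characters are exactly a-z and A-Z).
def pyStrIslower (w : String) : Bool :=
  w.toList.any PySem.Chars.islower && !(w.toList.any PySem.Chars.isupper)

-- body of A's `for word_id, word in enumerate(temp_list)` loop: each slot is rewritten in
-- place from its own old value only, so the loop is a per-element update (a map).
-- `''.join([letter for letter in word if letter.isalpha()])` joins single characters,
-- i.e. builds the string of the filtered characters (exact).
def pvCleanWordA (w : String) : String :=
  let w1 := if ¬ PySem.Str.strIsalpha w then String.ofList (w.toList.filter PySem.Chars.isalpha) else w
  if ¬ pyStrIslower w1 then PySem.Str.lower w1 else w1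

-- `while '' in temp_list: temp_list.remove('')` — list.remove of a present element erases
-- its first occurrence; fuel = length bounds the number of iterations.
def pvRemoveEmptyLoop : Nat → List String → List String
  | 0, l => l
  | fuel + 1, l =>
    if "" ∈ l then
      match PySem.List.remove? l "" with
      | some l' => pvRemoveEmptyLoop fuel l'
      | none => l
    else l

def clean_tokenize_corpus (texts : List String) : List (List String) :=
  texts.foldl (fun corpus text_sample =>
    let temp_text := pvBrRepl text_sample
    let temp_list := (PySem.Str.split₀ temp_text).map pvCleanWordA
    corpus ++ [pvRemoveEmptyLoop temp_list.length temp_list]) []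

-- ===== PORT B =====
-- state of B's character loop: (tokens so far, current word buffer);
-- `tokens.append(''.join(current))` = append `String.ofList current`.
def pvScanStep (st : List String × List Char) (ch : Char) : List String × List Char :=
  if PySem.Chars.isalpha ch then (st.1, st.2 ++ [PySem.Chars.lowerChar ch])
  else if PySem.Chars.isspace ch then
    (if st.2 ≠ [] then st.1 ++ [String.ofList st.2] else st.1, [])
  else st

def clean_tokenize_corpus_alt (texts : List String) : List (List String) :=
  texts.foldl (fun corpus text_sample =>
    let temp_text := pvBrRepl text_sample
    let st := temp_text.toList.foldl pvScanStep ([], [])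
    let tokens := if st.2 ≠ [] then st.1 ++ [String.ofList st.2] else st.1
    corpus ++ [tokens]) []

-- ===== PRECONDITION & SPEC =====
def Spec_clean_tokenize_corpus (texts : List String) (out : List (List String)) : Prop := out = clean_tokenize_corpus_alt texts
instance (texts : List String) (out : List (List String)) : Decidable (Spec_clean_tokenize_corpus texts out) := by unfold Spec_clean_tokenize_corpus; infer_instance

-- ===== CLAIM (what is proved, stated in full; the proofs are below) =====
def Claim_equal_clean_tokenize_corpus : Prop := ∀ (texts : List String), Dom_clean_tokenize_corpus texts → Spec_clean_tokenize_corpus texts (clean_tokenize_corpus texts)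

-- ===== LEMMAS AND PROOFS =====

-- the per-word cleanup A performs, on the character-list side
def pvClean (ws : List Char) : List Char := PySem.Chars.lower (ws.filter PySem.Chars.isalpha)

-- proof-side copy of B's scan with char-list tokens (String.ofList applied afterwards)
def pvScanStepL (st : List (List Char) × List Char) (ch : Char) : List (List Char) × List Char :=
  if PySem.Chars.isalpha ch then (st.1, st.2 ++ [PySem.Chars.lowerChar ch])
  else if PySem.Chars.isspace ch then
    (if st.2 ≠ [] then st.1 ++ [st.2] else st.1, [])
  else st

def pvFlushL (st : List (List Char) × List Char) : List (List Char) :=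
  if st.2 ≠ [] then st.1 ++ [st.2] else st.1

lemma pvLower_eq_self (ws : List Char) (h : ∀ c ∈ ws, PySem.Chars.isupper c = false) :
    List.map PySem.Chars.lowerChar ws = ws := by
  induction ws with
  | nil => rfl
  | cons a l ih =>
    simp only [List.map_cons]
    rw [ih (fun c hc => h c (List.mem_cons_of_mem a hc))]
    simp [PySem.Chars.lowerChar, h a (List.mem_cons_self)]

lemma step2 (vs : List Char) :
    (if ¬ pyStrIslower (String.ofList vs) then PySem.Str.lower (String.ofList vs) else String.ofList vs) = String.ofList (PySem.Chars.lower vs) := by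
  by_cases hl : pyStrIslower (String.ofList vs)
  · have hl' := hl
    unfold pyStrIslower at hl'
    simp only [String.toList_ofList, Bool.and_eq_true, Bool.not_eq_true', List.any_eq_false] at hl'
    have : PySem.Chars.lower vs = vs := by
      unfold PySem.Chars.lower; exact pvLower_eq_self vs (by simpa using hl'.2)
    simp [hl, this]
  · apply String.toList_inj.mp
    simp [hl, PySem.Str.lower]

lemma pvCleanWordA_ofList (ws : List Char) :
    pvCleanWordA (String.ofList ws) = String.ofList (pvClean ws) := by
  unfold pvCleanWordA pvClean
  by_cases ha : PySem.Chars.strIsalpha ws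
  · have hfa : ws.filter PySem.Chars.isalpha = ws := by
      apply List.filter_eq_self.mpr
      have := ha
      simp [PySem.Chars.strIsalpha] at this
      exact fun c hc => this.2 c hc
    rw [show (if ¬ PySem.Str.strIsalpha (String.ofList ws) = true then String.ofList ((String.ofList ws).toList.filter PySem.Chars.isalpha) else String.ofList ws) = String.ofList ws by simp [ha], hfa]
    exact step2 ws
  · rw [show (if ¬ PySem.Str.strIsalpha (String.ofList ws) = true then String.ofList ((String.ofList ws).toList.filter PySem.Chars.isalpha) else String.ofList ws) = String.ofList (ws.filter PySem.Chars.isalpha) by simp [Bool.not_eq_true] at ha ⊢; simp [ha]]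
    exact step2 (ws.filter PySem.Chars.isalpha)

lemma filter_erase_ne {α : Type} [DecidableEq α] (a : α) (l : List α) :
    (l.erase a).filter (· ≠ a) = l.filter (· ≠ a) := by
  induction l with
  | nil => rfl
  | cons x xs ih =>
    by_cases hx : x = a
    · subst hx; simp [List.erase_cons_head]
    · rw [List.erase_cons_tail (by simp [hx])]
      simpa [hx] using ih

lemma pvRemoveEmptyLoop_eq_filter (fuel : Nat) : ∀ (l : List String), l.length ≤ fuel →
    pvRemoveEmptyLoop fuel l = l.filter (· ≠ "") := by
  induction fuel with
  | zero => intro l h; rw [List.length_eq_zero_iff.mp (Nat.le_zero.mp h)]; rfl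
  | succ n ih =>
    intro l h
    unfold pvRemoveEmptyLoop
    by_cases hm : "" ∈ l
    · rw [if_pos hm]
      simp only [PySem.List.remove?_eq_some_erase l "" hm]
      rw [ih (l.erase "") (by have := List.length_erase_of_mem hm; omega)]
      exact filter_erase_ne "" l
    · rw [if_neg hm]
      exact (List.filter_eq_self.mpr (fun x hx => by simp; exact fun e => hm (e ▸ hx))).symm

lemma space_not_alpha (c : Char) (h : PySem.Chars.isspace c = true) : PySem.Chars.isalpha c = false := by
  unfold PySem.Chars.isspace at h
  unfold PySem.Chars.isalpha PySem.Chars.isupper PySem.Chars.islower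
  simp only [Char.le_def, UInt32.le_iff_toNat_le, Char.toNat] at *
  simp only [Bool.or_eq_true, Bool.and_eq_true, decide_eq_true_eq] at h
  simp only [Bool.or_eq_false_iff, Bool.and_eq_false_iff, decide_eq_false_iff_not, not_le]
  simp only [show ('A').val.toNat = 65 from rfl, show ('Z').val.toNat = 90 from rfl, show ('a').val.toNat = 97 from rfl, show ('z').val.toNat = 122 from rfl]
  omega

lemma pvClean_append_singleton (ws : List Char) (c : Char) :
    pvClean (ws ++ [c]) = pvClean ws ++ (if PySem.Chars.isalpha c then [PySem.Chars.lowerChar c] else []) := by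
  by_cases h : PySem.Chars.isalpha c <;> simp [pvClean, PySem.Chars.lower, List.filter_append, h]

lemma pvClean_nil : pvClean [] = [] := rfl

lemma pvGo_vs_scan (rest : List Char) : ∀ (cur : List Char) (acc : List (List Char)),
    ((PySem.Chars.split₀.go rest cur acc).map pvClean).filter (· ≠ []) =
      pvFlushL (rest.foldl pvScanStepL ((acc.reverse.map pvClean).filter (· ≠ []), pvClean cur.reverse)) := by
  induction rest with
  | nil =>
    intro cur acc
    rw [PySem.Chars.split₀.go.eq_def]
    cases cur with
    | nil => simp [pvFlushL, pvClean, PySem.Chars.lower]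
    | cons a l =>
      simp only [List.isEmpty_cons, List.foldl_nil, pvFlushL]
      rw [if_neg (by simp)]
      by_cases h : pvClean (l.reverse ++ [a]) = [] <;>
        simp [h, List.filter_append]
  | cons c rest ih =>
    intro cur acc
    rw [PySem.Chars.split₀.go.eq_def]
    simp only [List.foldl_cons]
    by_cases hs : PySem.Chars.isspace c
    · rw [if_pos hs]
      have hstep : pvScanStepL ((acc.reverse.map pvClean).filter (· ≠ []), pvClean cur.reverse) c =
          (if pvClean cur.reverse ≠ [] then (acc.reverse.map pvClean).filter (· ≠ []) ++ [pvClean cur.reverse] else (acc.reverse.map pvClean).filter (· ≠ []), []) := by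
        simp [pvScanStepL, space_not_alpha c hs, hs]
      rw [hstep]
      cases cur with
      | nil =>
        rw [if_pos (by simp)]
        rw [ih [] acc]
        simp [pvClean, PySem.Chars.lower]
      | cons a l =>
        rw [if_neg (by simp)]
        rw [ih [] (( (a :: l).reverse) :: acc)]
        have hXY : ((( (a :: l).reverse) :: acc).reverse.map pvClean).filter (· ≠ []) =
            (if pvClean (a :: l).reverse ≠ [] then
              ((acc.reverse.map pvClean).filter (· ≠ [])) ++ [pvClean (a :: l).reverse]
            else (acc.reverse.map pvClean).filter (· ≠ [])) := by
          rw [List.reverse_cons, List.map_append, List.filter_append]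
          by_cases h : pvClean ((a :: l).reverse) = []
          · rw [if_neg (by simpa using h)]
            simp only [List.map_cons, List.map_nil, List.filter_cons, h]
            simp
          · rw [if_pos (by simpa using h)]
            simp only [List.map_cons, List.map_nil, List.filter_cons]
            rw [if_pos (by simpa using h)]
            simp
        rw [hXY]
        rfl
    · rw [if_neg hs]
      rw [ih (c :: cur) acc]
      have hstep : pvScanStepL ((acc.reverse.map pvClean).filter (· ≠ []), pvClean cur.reverse) c =
          ((acc.reverse.map pvClean).filter (· ≠ []), pvClean ((c :: cur).reverse)) := by
        rw [List.reverse_cons, pvClean_append_singleton]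
        by_cases ha : PySem.Chars.isalpha c <;> simp [pvScanStepL, ha, hs]
      rw [hstep]

-- B's String-building scan is the char-list scan with String.ofList mapped over the tokens
lemma pvScan_strings (rest : List Char) : ∀ (toks : List (List Char)) (cur : List Char),
    rest.foldl pvScanStep (toks.map String.ofList, cur) =
      ((rest.foldl pvScanStepL (toks, cur)).1.map String.ofList, (rest.foldl pvScanStepL (toks, cur)).2) := by
  induction rest with
  | nil => intro toks cur; rfl
  | cons c rest ih =>
    intro toks cur
    simp only [List.foldl_cons]
    by_cases ha : PySem.Chars.isalpha c
    · rw [show pvScanStep (toks.map String.ofList, cur) c = (toks.map String.ofList, cur ++ [PySem.Chars.lowerChar c]) by simp [pvScanStep, ha]]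
      rw [show pvScanStepL (toks, cur) c = (toks, cur ++ [PySem.Chars.lowerChar c]) by simp [pvScanStepL, ha]]
      exact ih toks (cur ++ [PySem.Chars.lowerChar c])
    · by_cases hs : PySem.Chars.isspace c
      · by_cases hc : cur = []
        · rw [show pvScanStep (toks.map String.ofList, cur) c = (toks.map String.ofList, []) by simp [pvScanStep, ha, hs, hc]]
          rw [show pvScanStepL (toks, cur) c = (toks, []) by simp [pvScanStepL, ha, hs, hc]]
          exact ih toks []
        · rw [show pvScanStep (toks.map String.ofList, cur) c = ((toks ++ [cur]).map String.ofList, []) by simp [pvScanStep, ha, hs, hc]]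
          rw [show pvScanStepL (toks, cur) c = (toks ++ [cur], []) by simp [pvScanStepL, ha, hs, hc]]
          exact ih (toks ++ [cur]) []
      · rw [show pvScanStep (toks.map String.ofList, cur) c = (toks.map String.ofList, cur) by simp [pvScanStep, ha, hs]]
        rw [show pvScanStepL (toks, cur) c = (toks, cur) by simp [pvScanStepL, ha, hs]]
        exact ih toks cur

-- per-text agreement
lemma pvPerText (t : String) :
    pvRemoveEmptyLoop ((PySem.Str.split₀ t).map pvCleanWordA).length ((PySem.Str.split₀ t).map pvCleanWordA) =
      (fun st => if st.2 ≠ [] then st.1 ++ [String.ofList st.2] else st.1) (t.toList.foldl pvScanStep ([], [])) := by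
  rw [pvRemoveEmptyLoop_eq_filter _ _ (le_refl _)]
  have hmap : (PySem.Str.split₀ t).map pvCleanWordA = ((PySem.Chars.split₀ t.toList).map pvClean).map String.ofList := by
    rw [PySem.Str.split₀, List.map_map, List.map_map]
    exact List.map_congr_left (fun ws _ => pvCleanWordA_ofList ws)
  rw [hmap, List.filter_map]
  have hfc : ((PySem.Chars.split₀ t.toList).map pvClean).filter ((fun s => s ≠ "") ∘ String.ofList) =
      ((PySem.Chars.split₀ t.toList).map pvClean).filter (· ≠ []) := by
    apply List.filter_congr
    intro x _
    simp
  rw [hfc]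
  have hgo := pvGo_vs_scan t.toList [] []
  rw [PySem.Chars.split₀] at *
  rw [hgo]
  have hstr := pvScan_strings t.toList [] []
  simp only [List.map_nil] at hstr
  rw [hstr]
  unfold pvFlushL
  simp only [List.reverse_nil, pvClean_nil, List.map_nil, List.filter_nil]
  by_cases h : (t.toList.foldl pvScanStepL ([], [])).2 = [] <;> simp [h]

-- ===== VERDICT (by name: the statement is the Claim_ definition above) =====
theorem clean_tokenize_corpus_spec : Claim_equal_clean_tokenize_corpus := by
  intro texts _
  unfold Spec_clean_tokenize_corpus clean_tokenize_corpus clean_tokenize_corpus_alt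
  rw [PySem.List.foldl_append_singleton_eq_map, PySem.List.foldl_append_singleton_eq_map]
  simp only [List.nil_append]
  apply List.map_congr_left
  intro t _
  exact pvPerText (pvBrRepl t)
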